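-- pv_equiv track=rewrite | github.com/AVUKU-PRAGATHESWARI/GeeksForGeeks | Even occurring elements.py | repeatingEven
-- ===== SOURCE A (Python) =====
-- def repeatingEven(arr, n):
--     result=[]
--     new=list(set(arr))
--     for i in new:
--         if arr.count(i)%2==0:
--             result.append(i)
--     if len(result)==0:
--         return [-1]
--     result.sort()
--     return result
-- ===== SOURCE B (Python) =====
-- def repeatingEven(arr, n):
--     s = sorted(arr)
--     result = []
--     i = 0
--     m = len(s)
--     while i < m:
--         j = i + 1
--         while j < m and s[j] == s[i]:
--             j += 1
--         if (j - i) % 2 == 0: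
--             result.append(s[i])
--         i = j
--     return result if result else [-1]
-- ===== Notes on version B (the rewrite author's own statement) =====
-- stated objective: faster
-- what changed: B sorts a copy of the array once and scans it left-to-right measuring consecutive run lengths, emitting a value when its run length is even (output is already ascending, no final sort); A instead rescans the whole array with arr.count for every distinct element and sorts at the end.
import Mathlib
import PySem

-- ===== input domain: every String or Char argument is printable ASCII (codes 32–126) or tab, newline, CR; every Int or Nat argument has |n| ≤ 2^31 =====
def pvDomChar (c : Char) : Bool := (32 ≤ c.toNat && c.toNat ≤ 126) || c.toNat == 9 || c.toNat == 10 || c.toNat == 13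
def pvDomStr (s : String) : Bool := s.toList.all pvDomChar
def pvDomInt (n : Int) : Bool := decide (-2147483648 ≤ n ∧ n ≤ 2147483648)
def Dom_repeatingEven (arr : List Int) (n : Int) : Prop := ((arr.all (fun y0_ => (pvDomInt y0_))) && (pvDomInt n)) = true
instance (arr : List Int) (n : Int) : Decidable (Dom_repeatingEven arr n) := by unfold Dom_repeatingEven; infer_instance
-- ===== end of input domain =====

-- B sorts a copy of the array once and scans consecutive runs, emitting values with even run length
-- (already ascending, no final sort); A rescans the array with count for each distinct element. Return values proved equal on all inputs.

-- ===== PORT A =====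
-- A iterates over list(set(arr)) appending even-count elements, then sorts;
-- the sort makes the result independent of set iteration order, so folding
-- over PySem.Set.ofList arr (first-occurrence order) is faithful.
def repeatingEven (arr : List Int) (n : Int) : List Int :=
  let result := (PySem.Set.ofList arr).foldl
    (fun r i => if PySem.Int.mod (PySem.List.count arr i : Int) 2 == 0 then r ++ [i] else r) []
  if result.length = 0 then [-1]
  else PySem.List.sorted result (fun x => x) false

-- ===== PORT B =====
-- the inner while loop: the run of elements equal to s[i] is the takeWhile prefix,
-- and the scan resumes at the dropWhile remainder (j - i = run length + 1).
def runsEven (s : List Int) : List Int :=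
  match s with
  | [] => []
  | x :: xs =>
    (if ((xs.takeWhile (fun y => y == x)).length + 1) % 2 == 0 then [x] else []) ++
      runsEven (xs.dropWhile (fun y => y == x))
termination_by s.length
decreasing_by
  exact Nat.lt_succ_of_le (List.length_dropWhile_le _ _)

def repeatingEven_alt (arr : List Int) (n : Int) : List Int :=
  let result := runsEven (PySem.List.sorted arr (fun x => x) false)
  if result = [] then [-1] else result

-- ===== PRECONDITION & SPEC =====
def Spec_repeatingEven (arr : List Int) (n : Int) (out : List Int) : Prop := out = repeatingEven_alt arr n
instance (arr : List Int) (n : Int) (out : List Int) : Decidable (Spec_repeatingEven arr n out) := by unfold Spec_repeatingEven; infer_instance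

-- ===== CLAIM (what is proved, stated in full; the proofs are below) =====
def Claim_equal_repeatingEven : Prop := ∀ (arr : List Int) (n : Int), Dom_repeatingEven arr n → Spec_repeatingEven arr n (repeatingEven arr n)

-- ===== LEMMAS AND PROOFS =====

-- every element of dropWhile (== x) in a sorted list that is bounded below by x is strictly above x
lemma lt_of_mem_dropWhile (x : Int) (xs : List Int)
    (h : xs.Pairwise (· ≤ ·)) (hx : ∀ y ∈ xs, x ≤ y) :
    ∀ y ∈ xs.dropWhile (fun y => y == x), x < y := by
  induction xs with
  | nil => simp
  | cons a t ih =>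
    simp only [List.dropWhile_cons]
    split
    · exact ih (List.Pairwise.of_cons h) (fun y hy => hx y (List.mem_cons_of_mem _ hy))
    · rename_i hne
      intro y hy
      have hax : a ≠ x := by simpa using hne
      have hxa : x < a := lt_of_le_of_ne (hx a (List.mem_cons_self)) (Ne.symm hax)
      rcases List.mem_cons.1 hy with rfl | hyt
      · exact hxa
      · exact lt_of_lt_of_le hxa (List.rel_of_pairwise_cons h hyt)

-- every element of takeWhile (== x) equals x
lemma eq_of_mem_takeWhile (x : Int) (xs : List Int) :
    ∀ y ∈ xs.takeWhile (fun y => y == x), y = x := by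
  intro y hy
  simpa using List.mem_takeWhile_imp hy

-- membership in runsEven of a sorted list = membership with even count
lemma runsEven_mem (s : List Int) (h : s.Pairwise (· ≤ ·)) (y : Int) :
    y ∈ runsEven s ↔ y ∈ s ∧ s.count y % 2 = 0 := by
  induction s using runsEven.induct with
  | case1 => simp [runsEven]
  | case2 x xs ih =>
    rw [runsEven]
    set run := xs.takeWhile (fun y => y == x) with hrun
    set rest := xs.dropWhile (fun y => y == x) with hrest
    have hxs : run ++ rest = xs := List.takeWhile_append_dropWhile
    have hpxs : xs.Pairwise (· ≤ ·) := List.Pairwise.of_cons h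
    have hxle : ∀ y ∈ xs, x ≤ y := fun y hy => List.rel_of_pairwise_cons h hy
    have hrest_lt : ∀ y ∈ rest, x < y := lt_of_mem_dropWhile x xs hpxs hxle
    have hprest : rest.Pairwise (· ≤ ·) := hpxs.sublist (List.dropWhile_sublist _)
    have hcount_run : ∀ z, z ≠ x → run.count z = 0 := by
      intro z hz
      exact List.count_eq_zero.2 (fun hm => hz (eq_of_mem_takeWhile x xs z hm))
    have hcount_x_run : run.count x = run.length :=
      List.count_eq_length.2 (fun b hb => (eq_of_mem_takeWhile x xs b hb).symm)
    have hxnrest : x ∉ rest := fun hm => lt_irrefl x (hrest_lt x hm)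
    have ih' := ih hprest
    by_cases hyx : y = x
    · subst hyx
      have hnr : y ∉ runsEven rest := fun hm => hxnrest (ih'.1 hm).1
      have hcnt : (y :: xs).count y = run.length + 1 := by
        rw [List.count_cons_self, ← hxs, List.count_append, hcount_x_run,
            List.count_eq_zero.2 hxnrest]
      rw [hcnt]
      constructor
      · intro hm
        rcases List.mem_append.1 hm with hm1 | hm2
        · refine ⟨List.mem_cons_self, ?_⟩
          by_contra hodd
          simp only [beq_iff_eq] at hm1
          rw [if_neg (by simpa using hodd)] at hm1
          exact absurd hm1 (List.not_mem_nil)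
        · exact absurd hm2 hnr
      · intro ⟨_, heven⟩
        exact List.mem_append.2 (Or.inl (by simp [heven]))
    · have hcnt : (x :: xs).count y = rest.count y := by
        rw [← hxs]
        simp [List.count_append, hcount_run y hyx, (show x ≠ y from fun h => hyx h.symm)]
      have hyrun : y ∉ run := fun hm => hyx (eq_of_mem_takeWhile x xs y hm)
      have hmemxs : y ∈ x :: xs ↔ y ∈ rest := by
        rw [List.mem_cons, ← hxs, List.mem_append]
        constructor
        · rintro (rfl | hr | hr)
          · exact absurd rfl hyx
          · exact absurd hr hyrun
          · exact hr
        · intro hr; exact Or.inr (Or.inr hr)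
      rw [hcnt]
      constructor
      · intro hm
        rcases List.mem_append.1 hm with hm1 | hm2
        · exfalso
          have : y = x := by
            by_cases hc : (run.length + 1) % 2 == 0 <;> simp [hc] at hm1
            exact hm1
          exact hyx this
        · exact ⟨hmemxs.2 (ih'.1 hm2).1, (ih'.1 hm2).2⟩
      · intro ⟨hmem, heven⟩
        exact List.mem_append.2 (Or.inr (ih'.2 ⟨hmemxs.1 hmem, heven⟩))

-- runsEven of a sorted list is strictly increasing
lemma runsEven_pairwise (s : List Int) (h : s.Pairwise (· ≤ ·)) :
    (runsEven s).Pairwise (· < ·) := by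
  induction s using runsEven.induct with
  | case1 => simp [runsEven]
  | case2 x xs ih =>
    rw [runsEven]
    set rest := xs.dropWhile (fun y => y == x) with hrest
    have hpxs : xs.Pairwise (· ≤ ·) := List.Pairwise.of_cons h
    have hxle : ∀ y ∈ xs, x ≤ y := fun y hy => List.rel_of_pairwise_cons h hy
    have hrest_lt : ∀ y ∈ rest, x < y := lt_of_mem_dropWhile x xs hpxs hxle
    have hprest : rest.Pairwise (· ≤ ·) := hpxs.sublist (List.dropWhile_sublist _)
    have ih' := ih hprest
    have hsub : ∀ y ∈ runsEven rest, x < y := fun y hy =>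
      hrest_lt y ((runsEven_mem rest hprest y).1 hy).1
    by_cases hc : ((xs.takeWhile (fun y => y == x)).length + 1) % 2 == 0
    · simpa [hc] using List.Pairwise.cons hsub ih'
    · simpa [hc] using ih'

-- the two candidate lists agree: runsEven(sorted arr) is exactly A's sorted filtered set
lemma runsEven_eq_sorted_filter (arr : List Int) :
    PySem.List.sorted
        ((PySem.Set.ofList arr).filter
          (fun i => PySem.Int.mod (PySem.List.count arr i : Int) 2 == 0)) (fun x => x) false
      = runsEven (PySem.List.sorted arr (fun x => x) false) := by
  set s := PySem.List.sorted arr (fun x => x) false with hs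
  have hps : s.Pairwise (· ≤ ·) := by
    simpa using PySem.List.sorted_pairwise arr (fun x => x)
  have hperm : s.Perm arr := PySem.List.sorted_perm arr (fun x => x) false
  apply PySem.List.sorted_eq_of_perm_of_pairwise_lt
  · -- permutation via nodup + same membership
    rw [List.perm_ext_iff_of_nodup
        ((runsEven_pairwise s hps).imp (fun h => ne_of_lt h))
        ((PySem.Set.nodup_ofList arr).filter _)]
    intro a
    rw [runsEven_mem s hps a, List.mem_filter, PySem.Set.mem_ofList]
    have hm : a ∈ s ↔ a ∈ arr := hperm.mem_iff
    have hc : s.count a = arr.count a := hperm.count_eq a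
    rw [hm, hc]
    have hmod : (PySem.Int.mod ((PySem.List.count arr a : Nat) : Int) 2 == 0) = true
        ↔ arr.count a % 2 = 0 := by
      rw [PySem.Int.mod_eq_emod_of_pos (by norm_num : (0:Int) < 2)]
      simp only [PySem.List.count_eq, beq_iff_eq]
      omega
    rw [hmod]
  · simpa using runsEven_pairwise s hps

-- ===== VERDICT (by name: the statement is the Claim_ definition above) =====
theorem repeatingEven_spec : Claim_equal_repeatingEven := by
  intro arr n _
  unfold Spec_repeatingEven repeatingEven repeatingEven_alt
  simp only [PySem.List.foldl_append_if_eq_filter, List.nil_append]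
  rw [← runsEven_eq_sorted_filter arr]
  set L := (PySem.Set.ofList arr).filter
      (fun i => PySem.Int.mod (PySem.List.count arr i : Int) 2 == 0) with hL
  by_cases hE : L = []
  · rw [hE]
    decide
  · rw [if_neg (by rw [List.length_eq_zero_iff]; exact hE),
        if_neg (by simpa [PySem.List.sorted_eq_nil_iff] using hE)]
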